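-- pv_equiv track=rewrite | github.com/shahsalonik/AI-2022-23 | Unit 8/2 Shah Saloni decision_trees_2.py | fill_missing_info
-- ===== SOURCE A (Python) =====
-- def fill_missing_info(data_info, symbol):
--     new_data_info = []
--     for i in data_info:
--         new_point = []
--         for x in i:
--             if x != symbol:
--                 new_point.append(x)
--             else:
--                 col = [z[i.index(x)] for z in data_info]
--                 col_set = set(col)
--                 max_freq = 0
--                 key = col[0]
--                 for val in col_set:
--                     check = col.count(val)
--                     if check > max_freq:
--                         max_freq = check
--                         key = val
--                 new_point.append(key)
--         new_data_info.append(new_point)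
--     return new_data_info
-- ===== SOURCE B (Python) =====
-- def fill_missing_info(data_info, symbol):
--     width = 0
--     for row in data_info:
--         width = max(width, len(row))
--     modes = []
--     for j in range(width):
--         counts = {}
--         for row in data_info:
--             if j < len(row):
--                 v = row[j]
--                 counts[v] = counts.get(v, 0) + 1
--         best_count, best = 0, ""
--         for v, c in counts.items():
--             if c > best_count:
--                 best_count, best = c, v
--         modes.append(best)
--     return [[modes[j] if v == symbol else v for j, v in enumerate(row)]
--             for row in data_info]
-- ===== Notes on version B (the rewrite author's own statement) =====
-- stated objective: alternative
-- what changed: B computes each column's most-frequent value once (one dict counter per column) and then fills in a single pass over the cells, instead of rebuilding the column list and re-counting every distinct value for every missing cell (a win only when missing cells are frequent; a timing run's data contains none); B also fills each missing cell with its own column's mode instead of the mode of the row's first missing column.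
-- intended difference: On rows that contain the symbol in two different columns whose (unique) most-frequent values differ, A fills every missing cell of the row with the mode of the row's FIRST missing column (it locates the column with i.index(x), which always finds the first occurrence of the symbol), while B fills each missing cell with its own column's mode, which is the intended behaviour. — e.g. on fill_missing_info([["?", "?"], ["a", "b"], ["a", "b"]], "?"): A returns [["a", "a"], ["a", "b"], ["a", "b"]], B returns [["a", "b"], ["a", "b"], ["a", "b"]]
-- outside the precondition, e.g. on fill_missing_info([['?'], ['a'], ['b']], '?'): A returns [['a'], ['a'], ['b']], B returns [['?'], ['a'], ['b']]
import Mathlib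
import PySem

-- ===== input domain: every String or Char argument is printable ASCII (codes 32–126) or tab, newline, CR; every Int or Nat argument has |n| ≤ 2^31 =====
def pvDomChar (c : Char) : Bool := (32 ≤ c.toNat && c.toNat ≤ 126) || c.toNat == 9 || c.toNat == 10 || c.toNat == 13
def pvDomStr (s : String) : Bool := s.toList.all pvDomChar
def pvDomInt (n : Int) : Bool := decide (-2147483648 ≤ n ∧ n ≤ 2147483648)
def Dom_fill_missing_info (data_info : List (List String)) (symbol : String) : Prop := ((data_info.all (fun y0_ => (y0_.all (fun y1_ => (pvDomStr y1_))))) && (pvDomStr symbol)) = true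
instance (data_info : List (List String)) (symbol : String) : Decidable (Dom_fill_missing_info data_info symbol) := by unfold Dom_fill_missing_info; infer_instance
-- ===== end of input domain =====

-- B precomputes each column's mode once and fills in one pass (A rebuilds and recounts the column
-- per missing cell); B fills each missing cell with ITS column's mode where A always uses the mode
-- of the row's first missing column (see D_ below).


-- ===== PORT A =====
def fill_missing_info (data_info : List (List String)) (symbol : String) : List (List String) :=
  data_info.foldl (fun new_data_info i =>
    new_data_info ++ [
      i.foldl (fun new_point x =>
        if x ≠ symbol then
          new_point ++ [x]
        else
          -- col = [z[i.index(x)] for z in data_info]; z[j] raises IndexError on a too-short row z —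
          -- those inputs are outside Pre_ (pyGetD is exact on the rest; i.index(x) always succeeds: x ∈ i)
          let j : Nat := (PySem.List.index? i x).getD 0
          let col : List String := data_info.map (fun z => PySem.List.pyGetD z (j : Int) "")
          let col_set : PySem.Set String := PySem.Set.ofList col
          -- 'for val in col_set': set iteration order; exact inside Pre_, where the maximum is
          -- unique so the fold's result is order-independent
          let r := col_set.foldl (fun (p : Int × String) val =>
              let check : Int := (PySem.List.count col val : Int)
              if check > p.1 then (check, val) else p) (0, col.getD 0 "")
          new_point ++ [r.2]) []
    ]) []

-- ===== PORT B =====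
def fill_missing_info_alt (data_info : List (List String)) (symbol : String) : List (List String) :=
  let width : Nat := data_info.foldl (fun w row => max w row.length) 0
  let modes : List String := (List.range width).map (fun j =>
    let counts : PySem.Dict String Int := data_info.foldl (fun d row =>
        if j < row.length then
          d.insert (row.getD j "") (d.getD (row.getD j "") 0 + 1)
        else d) PySem.Dict.empty
    let r := counts.items.foldl (fun (p : Int × String) vc =>
        if vc.2 > p.1 then (vc.2, vc.1) else p) (0, "")
    r.2)
  data_info.map (fun row =>
    (PySem.List.enumerate row).map (fun jv =>
      if jv.2 = symbol then PySem.List.pyGetD modes jv.1 "" else jv.2))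

-- ===== PRECONDITION & SPEC =====
-- column j of the table: the j-th cell of every row that has one
def pvCol (data_info : List (List String)) (j : Nat) : List String :=
  data_info.filterMap (fun z => z[j]?)
-- the distinct values of col of maximal frequency (a unique mode ⟺ exactly one of them)
def topVals (col : List String) : List String :=
  (col.filter (fun v => col.all (fun w => decide (List.count w col ≤ List.count v col)))).dedup
-- Pre_ excludes inputs where a column holding the symbol somewhere is missing in some shorter row
-- (A raises IndexError when that column is a row's FIRST missing one, and reads the wrong column
-- otherwise) and inputs where such a column has a tie for most-frequent value, on which A's choice
-- depends on the interpreter's set iteration order.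
def Pre_fill_missing_info (data_info : List (List String)) (symbol : String) : Prop :=
  ∀ row ∈ data_info, ∀ j < row.length, row[j]? = some symbol →
    (∀ z ∈ data_info, j < z.length) ∧ (topVals (pvCol data_info j)).length = 1
instance (data_info : List (List String)) (symbol : String) : Decidable (Pre_fill_missing_info data_info symbol) := by
  unfold Pre_fill_missing_info; infer_instance

def pvWitness_fill_missing_info : List (List String) × String := ([["?"], ["a"], ["a"]], "?")

-- On rows containing the symbol in two different columns whose (unique) most-frequent values differ,
-- A fills every missing cell of the row with the mode of the row's FIRST missing column (it locates
-- the column with i.index(x), which always finds the first occurrence of the symbol), while B fills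
-- each missing cell with its own column's mode, which is the intended behaviour.
def D_fill_missing_info (data_info : List (List String)) (symbol : String) : Prop :=
  ∃ row ∈ data_info, ∃ j ∈ List.range row.length, row[j]? = some symbol ∧
    topVals (pvCol data_info (List.idxOf symbol row)) ≠ topVals (pvCol data_info j)
instance (data_info : List (List String)) (symbol : String) : Decidable (D_fill_missing_info data_info symbol) := by
  unfold D_fill_missing_info; infer_instance

def Spec_fill_missing_info (data_info : List (List String)) (symbol : String) (out : List (List String)) : Prop := ¬ D_fill_missing_info data_info symbol → out = fill_missing_info_alt data_info symbol
instance (data_info : List (List String)) (symbol : String) (out : List (List String)) : Decidable (Spec_fill_missing_info data_info symbol out) := by unfold Spec_fill_missing_info; infer_instance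

def pvDiffWitness_fill_missing_info : List (List String) × String :=
  ([["?", "?"], ["a", "b"], ["a", "b"]], "?")
def pvDiffWitnessOut_fill_missing_info : (List (List String)) × (List (List String)) :=
  ([["a", "a"], ["a", "b"], ["a", "b"]], [["a", "b"], ["a", "b"], ["a", "b"]])

-- ===== CLAIM (what is proved, stated in full; the proofs are below) =====
def Claim_unchanged_fill_missing_info : Prop := ∀ (data_info : List (List String)) (symbol : String), Dom_fill_missing_info data_info symbol → Pre_fill_missing_info data_info symbol → Spec_fill_missing_info data_info symbol (fill_missing_info data_info symbol)
def Claim_changed_fill_missing_info : Prop := Dom_fill_missing_info (pvDiffWitness_fill_missing_info.1) (pvDiffWitness_fill_missing_info.2) ∧ Pre_fill_missing_info (pvDiffWitness_fill_missing_info.1) (pvDiffWitness_fill_missing_info.2) ∧ D_fill_missing_info (pvDiffWitness_fill_missing_info.1) (pvDiffWitness_fill_missing_info.2) ∧ fill_missing_info (pvDiffWitness_fill_missing_info.1) (pvDiffWitness_fill_missing_info.2) = pvDiffWitnessOut_fill_missing_info.1 ∧ fill_missing_info_alt (pvDiffWitness_fill_missing_info.1) (pvDiffWitness_fill_missing_info.2)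 = pvDiffWitnessOut_fill_missing_info.2 ∧ pvDiffWitnessOut_fill_missing_info.1 ≠ pvDiffWitnessOut_fill_missing_info.2
def Claim_exact_fill_missing_info : Prop := ∀ (data_info : List (List String)) (symbol : String), Dom_fill_missing_info data_info symbol → Pre_fill_missing_info data_info symbol → D_fill_missing_info data_info symbol → fill_missing_info data_info symbol ≠ fill_missing_info_alt data_info symbol

-- ===== LEMMAS AND PROOFS =====

-- j0 is the index of the first occurrence of symbol in row (proof-side)
def firstSymIdx (row : List String) (symbol : String) (j0 : Nat) : Prop :=
  row[j0]? = some symbol ∧ ∀ k < j0, row[k]? ≠ some symbol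

theorem idxOf_of_first {row : List String} {symbol : String} {j0 : Nat}
    (h : PySem.List.index? row symbol = some j0) : List.idxOf symbol row = j0 := by
  rw [List.idxOf_eq_getD_idxOf?, ← PySem.List.index?_eq_idxOf?, h]; rfl

-- proof-side view of a column as the list of its per-row values (meaningful under the Pre_ lengths)
def colAt (data : List (List String)) (j : Nat) : List String :=
  data.map (fun z => z.getD j "")
def IsMode (col : List String) (v : String) : Prop :=
  v ∈ col ∧ ∀ w ∈ col, w ≠ v → List.count w col < List.count v col

theorem pvCol_eq (j : Nat) :
    ∀ (data : List (List String)), (∀ z ∈ data, j < z.length) →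
      pvCol data j = colAt data j := by
  intro data
  induction data with
  | nil => intro _; rfl
  | cons z zs ih =>
    intro h
    have hz : j < z.length := h z (List.mem_cons_self ..)
    unfold pvCol colAt
    rw [List.filterMap_cons, List.map_cons,
      List.getElem?_eq_getElem hz, List.getD_eq_getElem z "" hz]
    have := ih (fun z' hz' => h z' (List.mem_cons_of_mem _ hz'))
    unfold pvCol colAt at this
    rw [this]

theorem dedup_replicate_pos {n : Nat} (v : String) (h : 0 < n) :
    (List.replicate n v).dedup = [v] := by
  induction n with
  | zero => omega
  | succ m ih =>
    rcases Nat.eq_zero_or_pos m with hm | hm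
    · subst hm; rfl
    · rw [List.replicate_succ, List.dedup_cons_of_mem (by simp [List.mem_replicate]; omega)]
      exact ih hm

theorem topVals_eq_iff (col : List String) (v : String) :
    topVals col = [v] ↔ IsMode col v := by
  unfold topVals IsMode
  constructor
  · intro h
    have hv : v ∈ col ∧ ∀ w ∈ col, List.count w col ≤ List.count v col := by
      have : v ∈ (col.filter (fun v => col.all (fun w => decide (List.count w col ≤ List.count v col)))).dedup := by
        rw [h]; exact List.mem_singleton.mpr rfl
      rw [List.mem_dedup, List.mem_filter] at this
      exact ⟨this.1, by simpa [List.all_eq_true] using this.2⟩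
    refine ⟨hv.1, fun w hw hne => ?_⟩
    by_contra hle
    have hcnt : List.count w col = List.count v col :=
      Nat.le_antisymm (hv.2 w hw) (by omega)
    have hwmem : w ∈ (col.filter (fun v => col.all (fun w => decide (List.count w col ≤ List.count v col)))).dedup := by
      rw [List.mem_dedup, List.mem_filter]
      exact ⟨hw, by simp [List.all_eq_true, hcnt]; intro u hu; exact hv.2 u hu⟩
    rw [h] at hwmem
    exact hne (List.mem_singleton.mp hwmem)
  · rintro ⟨hmem, hmax⟩
    have hcg : col.filter (fun v => col.all (fun w => decide (List.count w col ≤ List.count v col)))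
             = col.filter (fun x => x == v) := by
      refine List.filter_congr fun x hx => ?_
      by_cases hxv : x = v
      · have h1 : (x == v) = true := by simp [hxv]
        rw [h1, List.all_eq_true]
        simp only [decide_eq_true_eq, hxv]
        intro u hu
        by_cases huv : u = v
        · exact Nat.le_of_eq (by rw [huv])
        · exact Nat.le_of_lt (hmax u hu huv)
      · have h1 : (x == v) = false := by simp [hxv]
        rw [h1, List.all_eq_false]
        refine ⟨v, hmem, ?_⟩
        have := hmax x hx hxv
        simp only [decide_eq_true_eq]
        omega
    rw [hcg, List.filter_beq]
    exact dedup_replicate_pos v (List.count_pos_iff.mpr hmem)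

-- the shared max-scan: both A's set loop and B's dict-items loop are this fold, and under a
-- unique mode it ends in (count v, v) whatever the traversal order
theorem modeFold (col : List String) (v : String) (hv : IsMode col v) :
    ∀ (l : List String) (st : Int × String), (∀ w ∈ l, w ∈ col) →
      (st = ((List.count v col : Int), v) ∨ st.1 < (List.count v col : Int)) →
      (v ∈ l ∨ st = ((List.count v col : Int), v)) →
      l.foldl (fun p val => if ((List.count val col : Int)) > p.1 then ((List.count val col : Int), val) else p) st
        = ((List.count v col : Int), v) := by
  intro l
  induction l with
  | nil =>
    intro st _ _ h3
    simpa using h3.resolve_left (by simp)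
  | cons x xs ih =>
    intro st hsub hst hmem
    simp only [List.foldl_cons]
    by_cases hx : x = v
    · subst hx
      by_cases hgt : ((List.count x col : Int)) > st.1
      · rw [if_pos hgt]
        exact ih _ (fun w hw => hsub w (List.mem_cons_of_mem _ hw)) (Or.inl rfl) (Or.inr rfl)
      · rw [if_neg hgt]
        have hst' : st = ((List.count x col : Int), x) := by
          rcases hst with h | h
          · exact h
          · omega
        exact ih _ (fun w hw => hsub w (List.mem_cons_of_mem _ hw)) (Or.inl hst') (Or.inr hst')
    · have hxcol : x ∈ col := hsub x (List.mem_cons_self ..)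
      have hlt : List.count x col < List.count v col := hv.2 x hxcol hx
      have hvmem : v ∈ xs ∨ st = ((List.count v col : Int), v) := by
        rcases hmem with h | h
        · rcases List.mem_cons.mp h with h' | h'
          · exact absurd h'.symm hx
          · exact Or.inl h'
        · exact Or.inr h
      by_cases hgt : ((List.count x col : Int)) > st.1
      · rw [if_pos hgt]
        have hvxs : v ∈ xs := by
          rcases hvmem with h | h
          · exact h
          · rw [h] at hgt; simp at hgt; omega
        exact ih _ (fun w hw => hsub w (List.mem_cons_of_mem _ hw))
          (Or.inr (by simp; omega)) (Or.inl hvxs)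
      · rw [if_neg hgt]
        exact ih _ (fun w hw => hsub w (List.mem_cons_of_mem _ hw)) hst hvmem

theorem pv_colA_eq (data : List (List String)) (j : Nat) :
    data.map (fun z => PySem.List.pyGetD z (j : Int) "") = colAt data j := by
  unfold colAt
  exact List.map_congr_left fun z _ => PySem.List.pyGetD_natCast z j ""

-- A's fill value at a consulted column j is the column's unique mode
theorem A_fill_val (data : List (List String)) (j : Nat) (v : String)
    (hv : IsMode (colAt data j) v) :
    (((PySem.Set.ofList (data.map (fun z => PySem.List.pyGetD z (j : Int) ""))).foldl
       (fun (p : Int × String) val =>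
          if ((PySem.List.count (data.map (fun z => PySem.List.pyGetD z (j : Int) "")) val : Int)) > p.1
          then ((PySem.List.count (data.map (fun z => PySem.List.pyGetD z (j : Int) "")) val : Int), val) else p)
       (0, (data.map (fun z => PySem.List.pyGetD z (j : Int) "")).getD 0 ""))).2 = v := by
  rw [pv_colA_eq]
  have h := modeFold (colAt data j) v hv (PySem.Set.ofList (colAt data j))
      (0, (colAt data j).getD 0 "")
      (fun w hw => (PySem.Set.mem_ofList _ _).mp hw)
      (Or.inr (by change (0 : Int) < _; exact_mod_cast List.count_pos_iff.mpr hv.1))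
      (Or.inl ((PySem.Set.mem_ofList _ _).mpr hv.1))
  simp only [PySem.List.count_eq]
  exact congrArg Prod.snd h

-- B's guarded counting loop over the rows is the counter of the column (every row reaches column j)
theorem B_counts_eq (j : Nat) :
    ∀ (data : List (List String)) (d : PySem.Dict String Int), (∀ z ∈ data, j < z.length) →
    data.foldl (fun d row => if j < row.length then d.insert (row.getD j "") (d.getD (row.getD j "") 0 + 1) else d) d
      = (data.map (fun z => z.getD j "")).foldl (fun d x => d.insert x (d.getD x 0 + 1)) d := by
  intro data
  induction data with
  | nil => intro d _; rfl
  | cons z zs ih =>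
    intro d h
    simp only [List.foldl_cons, List.map_cons]
    rw [if_pos (h z (List.mem_cons_self ..))]
    exact ih _ (fun z' hz' => h z' (List.mem_cons_of_mem _ hz'))

-- B's best-of-items scan at a consulted column j is the column's unique mode
theorem B_mode_val (data : List (List String)) (j : Nat) (w : String)
    (hlen : ∀ z ∈ data, j < z.length) (hw : IsMode (colAt data j) w) :
    ((data.foldl (fun d row => if j < row.length then d.insert (row.getD j "") (d.getD (row.getD j "") 0 + 1) else d)
        PySem.Dict.empty).items.foldl
      (fun (p : Int × String) vc => if vc.2 > p.1 then (vc.2, vc.1) else p) (0, "")).2 = w := by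
  rw [B_counts_eq j data PySem.Dict.empty hlen,
      PySem.Dict.foldl_insert_getD_add_one_eq_counter,
      PySem.Dict.items_counter, List.foldl_map]
  have h := modeFold (colAt data j) w hw (PySem.Set.ofList (colAt data j)) (0, "")
      (fun u hu => (PySem.Set.mem_ofList _ _).mp hu)
      (Or.inr (by change (0 : Int) < _; exact_mod_cast List.count_pos_iff.mpr hw.1))
      (Or.inl ((PySem.Set.mem_ofList _ _).mpr hw.1))
  unfold colAt at h
  exact congrArg Prod.snd h

theorem foldl_if_append (symbol : String) (E : String → String) (l acc : List String) :
    l.foldl (fun a x => if x ≠ symbol then a ++ [x] else a ++ [E x]) acc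
      = acc ++ l.map (fun x => if x ≠ symbol then x else E x) := by
  have h : (fun (a : List String) x => if x ≠ symbol then a ++ [x] else a ++ [E x])
         = fun a x => a ++ [if x ≠ symbol then x else E x] := by
    funext a x; split <;> rfl
  rw [h, PySem.List.foldl_append_singleton_eq_map]

-- A as a map over rows and cells
theorem A_eq_map (data_info : List (List String)) (symbol : String) :
    fill_missing_info data_info symbol = data_info.map (fun i => i.map (fun x =>
      if x ≠ symbol then x else
        ((PySem.Set.ofList (data_info.map (fun z =>
            PySem.List.pyGetD z (((PySem.List.index? i x).getD 0 : Nat) : Int) ""))).foldl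
          (fun (p : Int × String) val =>
            if ((PySem.List.count (data_info.map (fun z =>
                  PySem.List.pyGetD z (((PySem.List.index? i x).getD 0 : Nat) : Int) "")) val : Int)) > p.1
            then ((PySem.List.count (data_info.map (fun z =>
                  PySem.List.pyGetD z (((PySem.List.index? i x).getD 0 : Nat) : Int) "")) val : Int), val) else p)
          (0, (data_info.map (fun z =>
                PySem.List.pyGetD z (((PySem.List.index? i x).getD 0 : Nat) : Int) "")).getD 0 "")).2)) := by
  unfold fill_missing_info
  rw [PySem.List.foldl_append_singleton_eq_map]
  simp only [List.nil_append]
  refine List.map_congr_left fun i _ => ?_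
  rw [foldl_if_append]
  simp only [List.nil_append]

-- B as a map over rows and enumerated cells (the lets of the port, zeta-expanded)
theorem B_eq_map (data_info : List (List String)) (symbol : String) :
    fill_missing_info_alt data_info symbol = data_info.map (fun row =>
      (PySem.List.enumerate row).map (fun jv =>
          if jv.2 = symbol then
            PySem.List.pyGetD ((List.range (data_info.foldl (fun w row => max w row.length) 0)).map (fun j =>
              ((data_info.foldl (fun d row => if j < row.length then
                  d.insert (row.getD j "") (d.getD (row.getD j "") 0 + 1) else d)
                  PySem.Dict.empty).items.foldl
                (fun (p : Int × String) vc => if vc.2 > p.1 then (vc.2, vc.1) else p) (0, "")).2)) jv.1 ""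
          else jv.2)) := rfl

theorem pv_foldl_max_init : ∀ (l : List (List String)) (a : Nat),
    a ≤ l.foldl (fun w row => max w row.length) a := by
  intro l
  induction l with
  | nil => intro a; exact Nat.le_refl a
  | cons x xs ih =>
    intro a
    simp only [List.foldl_cons]
    exact Nat.le_trans (Nat.le_max_left _ _) (ih _)

theorem pv_len_le_width : ∀ (l : List (List String)) (a : Nat) (r : List String), r ∈ l →
    r.length ≤ l.foldl (fun w row => max w row.length) a := by
  intro l
  induction l with
  | nil => intro a r h; cases h
  | cons x xs ih =>
    intro a r h
    simp only [List.foldl_cons]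
    rcases List.mem_cons.mp h with h' | h'
    · subst h'; exact Nat.le_trans (Nat.le_max_right _ _) (pv_foldl_max_init _ _)
    · exact ih _ r h'

theorem index?_of_first {row : List String} {symbol : String} {j0 : Nat}
    (h : firstSymIdx row symbol j0) : PySem.List.index? row symbol = some j0 := by
  obtain ⟨hget, hmin⟩ := h
  obtain ⟨hlt, hgete⟩ := List.getElem?_eq_some_iff.mp hget
  have hmem : symbol ∈ row := hgete ▸ List.getElem_mem hlt
  obtain ⟨j1, hj1⟩ := Option.isSome_iff_exists.mp ((PySem.List.index?_isSome_iff row symbol).mpr hmem)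
  obtain ⟨hlt1, hget1, hmin1⟩ := PySem.List.getElem_of_index?_eq_some hj1
  have : j1 = j0 := by
    rcases Nat.lt_trichotomy j1 j0 with h' | h' | h'
    · exact absurd (by rw [List.getElem?_eq_getElem hlt1, hget1]) (hmin j1 h')
    · exact h'
    · exact absurd hgete (hmin1 j0 h')
  rw [hj1, this]

-- the mode that A writes and the mode that B writes, at a cell (row, k) holding the symbol
theorem cell_values (data_info : List (List String)) (symbol : String)
    (hpre : Pre_fill_missing_info data_info symbol)
    (row : List String) (hrow : row ∈ data_info) (k : Nat) (hk : k < row.length)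
    (hsym : row[k] = symbol) :
    ∃ j0 v w, firstSymIdx row symbol j0 ∧ j0 < row.length ∧
      topVals (pvCol data_info j0) = [v] ∧ topVals (pvCol data_info k) = [w] ∧
      (row.map (fun x =>
        if x ≠ symbol then x else
          ((PySem.Set.ofList (data_info.map (fun z =>
              PySem.List.pyGetD z (((PySem.List.index? row x).getD 0 : Nat) : Int) ""))).foldl
            (fun (p : Int × String) val =>
              if ((PySem.List.count (data_info.map (fun z =>
                    PySem.List.pyGetD z (((PySem.List.index? row x).getD 0 : Nat) : Int) "")) val : Int)) > p.1
              then ((PySem.List.count (data_info.map (fun z =>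
                    PySem.List.pyGetD z (((PySem.List.index? row x).getD 0 : Nat) : Int) "")) val : Int), val) else p)
            (0, (data_info.map (fun z =>
                  PySem.List.pyGetD z (((PySem.List.index? row x).getD 0 : Nat) : Int) "")).getD 0 "")).2))[k]'(by simpa using hk) = v ∧
      ((PySem.List.enumerate row).map (fun jv =>
          if jv.2 = symbol then
            PySem.List.pyGetD ((List.range (data_info.foldl (fun w row => max w row.length) 0)).map (fun j =>
              ((data_info.foldl (fun d row => if j < row.length then
                  d.insert (row.getD j "") (d.getD (row.getD j "") 0 + 1) else d)
                  PySem.Dict.empty).items.foldl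
                (fun (p : Int × String) vc => if vc.2 > p.1 then (vc.2, vc.1) else p) (0, "")).2)) jv.1 ""
          else jv.2))[k]'(by simpa [PySem.List.length_enumerate] using hk) = w := by
  have hmem : symbol ∈ row := hsym ▸ List.getElem_mem hk
  obtain ⟨j0, hj0⟩ := Option.isSome_iff_exists.mp ((PySem.List.index?_isSome_iff row symbol).mpr hmem)
  obtain ⟨hj0lt, hj0get, hj0min⟩ := PySem.List.getElem_of_index?_eq_some hj0
  have hfirst : firstSymIdx row symbol j0 :=
    ⟨by rw [List.getElem?_eq_getElem hj0lt, hj0get],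
     fun k' hk' => by
       rw [List.getElem?_eq_getElem (Nat.lt_trans hk' hj0lt)]
       simpa using hj0min k' hk'⟩
  obtain ⟨hlen0, hone0⟩ := hpre row hrow j0 hj0lt hfirst.1
  obtain ⟨hlenk, honek⟩ := hpre row hrow k hk (by rw [List.getElem?_eq_getElem hk, hsym])
  obtain ⟨v, hv⟩ := List.length_eq_one_iff.mp hone0
  obtain ⟨w, hw⟩ := List.length_eq_one_iff.mp honek
  have hvm : IsMode (colAt data_info j0) v := by
    rw [pvCol_eq j0 data_info hlen0] at hv; exact (topVals_eq_iff _ v).mp hv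
  have hwm : IsMode (colAt data_info k) w := by
    rw [pvCol_eq k data_info hlenk] at hw; exact (topVals_eq_iff _ w).mp hw
  refine ⟨j0, v, w, hfirst, hj0lt, hv, hw, ?_, ?_⟩
  · rw [List.getElem_map]
    rw [if_neg (by simp [hsym])]
    rw [hsym, hj0]
    exact A_fill_val data_info j0 v hvm
  · rw [List.getElem_map, PySem.List.getElem_enumerate]
    rw [if_pos (by simpa using hsym)]
    have hkw : k < data_info.foldl (fun w row => max w row.length) 0 :=
      Nat.lt_of_lt_of_le hk (pv_len_le_width data_info 0 row hrow)
    have hz : ((0 : Int) + (k : Nat)) = ((k : Nat) : Int) := by omega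
    rw [hz, PySem.List.pyGetD_natCast]
    rw [List.getD_eq_getElem _ "" (by simpa using hkw), List.getElem_map, List.getElem_range]
    exact B_mode_val data_info k w hlenk hwm

theorem unchanged_lemma (data_info : List (List String)) (symbol : String)
    (hpre : Pre_fill_missing_info data_info symbol)
    (hnd : ¬ D_fill_missing_info data_info symbol) :
    fill_missing_info data_info symbol = fill_missing_info_alt data_info symbol := by
  rw [A_eq_map, B_eq_map]
  refine List.map_congr_left fun row hrow => ?_
  refine List.ext_getElem (by simp [PySem.List.length_enumerate]) fun k h1 h2 => ?_
  have hk : k < row.length := by simpa using h1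
  by_cases hx : row[k] = symbol
  · obtain ⟨j0, v, w, hfirst, hj0lt, hv, hw, hA, hB⟩ :=
      cell_values data_info symbol hpre row hrow k hk hx
    rw [hA, hB]
    by_contra hne
    have hidx : List.idxOf symbol row = j0 := idxOf_of_first (index?_of_first hfirst)
    exact hnd ⟨row, hrow, k, List.mem_range.mpr hk,
      by rw [List.getElem?_eq_getElem hk, hx],
      by rw [hidx, hv, hw]; simp [hne]⟩
  · rw [List.getElem_map, List.getElem_map, PySem.List.getElem_enumerate,
        if_pos (by simpa using hx), if_neg (by simpa using hx)]

theorem tight_lemma (data_info : List (List String)) (symbol : String)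
    (hpre : Pre_fill_missing_info data_info symbol)
    (hd : D_fill_missing_info data_info symbol) :
    fill_missing_info data_info symbol ≠ fill_missing_info_alt data_info symbol := by
  obtain ⟨row, hrow, j, hjr, hjsym, htv⟩ := hd
  have hj : j < row.length := List.mem_range.mp hjr
  have hjget : row[j] = symbol := by
    obtain ⟨hx1, hx2⟩ := List.getElem?_eq_some_iff.mp hjsym
    exact hx2
  intro heq
  rw [A_eq_map, B_eq_map] at heq
  obtain ⟨j0', v', w', hfirst', hj0'lt, hv', hw', hA, hB⟩ :=
    cell_values data_info symbol hpre row hrow j hj hjget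
  -- A consults the row's first-symbol column, which is idxOf
  have hidx : List.idxOf symbol row = j0' := idxOf_of_first (index?_of_first hfirst')
  rw [hidx] at htv
  obtain ⟨n, hn, hdn⟩ := List.getElem_of_mem hrow
  have hrowEq := List.ext_getElem_iff.mp heq
  have hre := hrowEq.2 n (by simpa using hn) (by simpa using hn)
  rw [List.getElem_map, List.getElem_map, hdn] at hre
  have hcell := List.ext_getElem_iff.mp hre
  have hce := hcell.2 j (by simpa using hj) (by simpa [PySem.List.length_enumerate] using hj)
  rw [hA, hB] at hce
  -- but the two modes differ
  rw [hce] at hv'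
  exact htv (hv'.trans hw'.symm)

-- ===== VERDICT (by name: the statement is the Claim_ definition above) =====
theorem fill_missing_info_spec : Claim_unchanged_fill_missing_info := by
  intro data_info symbol _ hpre hnd
  exact unchanged_lemma data_info symbol hpre hnd

theorem fill_missing_info_changed : Claim_changed_fill_missing_info := by
  unfold Claim_changed_fill_missing_info; decide

theorem fill_missing_info_tight : Claim_exact_fill_missing_info := by
  intro data_info symbol _ hpre hd
  exact tight_lemma data_info symbol hpre hd
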